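-- pv_equiv track=rewrite | github.com/mhit/Whisper-Transcription-Service | archive/experimental_modules/dual_optimized_generator.py | _add_section_structure
-- ===== SOURCE A (Python) =====
-- def _add_section_structure(report: str) -> str:
--     """セクション構造を追加"""
--     # 簡易的な構造追加
--     lines = report.split('\n')
--     structured = []
--     section_count = 0
--
--     for line in lines:
--         if line and not line.startswith('#') and section_count % 30 == 0:
--             structured.append(f"## セクション{section_count // 30 + 1}")
--         structured.append(line)
--         section_count += 1
--
--     return '\n'.join(structured)
-- ===== SOURCE B (Python) =====
-- def _add_section_structure(report: str) -> str:
--     """セクション構造を追加"""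
--     # Staged pipeline: slice the lines into chunks of 30, decorate each chunk
--     # with its header when its first line qualifies, flatten; no running
--     # counter and no mutable accumulator loop.
--     lines = report.split('\n')
--     chunks = [lines[i:i + 30] for i in range(0, len(lines), 30)]
--
--     def decorate(j, g):
--         header = ['## セクション%d' % j] if g[0] and not g[0].startswith('#') else []
--         return header + g
--
--     return '\n'.join(s for j, g in enumerate(chunks, 1) for s in decorate(j, g))
-- ===== Notes on version B (the rewrite author's own statement) =====
-- stated objective: alternative
-- what changed: B replaces A's single accumulator loop with a per-line counter and mod/div arithmetic by a staged pipeline: slice the lines into chunks of 30 via range-with-step, decorate each enumerated chunk with its header when its first line qualifies, then flatten and join.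
import Mathlib
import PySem

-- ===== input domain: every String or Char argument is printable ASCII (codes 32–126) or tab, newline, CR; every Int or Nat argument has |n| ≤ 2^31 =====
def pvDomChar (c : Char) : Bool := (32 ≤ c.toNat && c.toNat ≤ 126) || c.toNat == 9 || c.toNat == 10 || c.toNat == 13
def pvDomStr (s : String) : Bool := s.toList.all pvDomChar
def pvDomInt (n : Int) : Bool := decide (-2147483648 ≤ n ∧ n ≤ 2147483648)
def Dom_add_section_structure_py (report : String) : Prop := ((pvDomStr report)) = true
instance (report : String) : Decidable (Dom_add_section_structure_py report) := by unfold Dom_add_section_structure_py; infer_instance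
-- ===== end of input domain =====

-- B replaces A's counter loop by a staged pipeline (chunks of 30 via range-with-step
-- slicing, decorate each enumerated chunk, flatten); objective: alternative.

-- ===== PORT A =====
-- A's loop: per line, append a header when the counter is a multiple of 30, then the line.
def loopA_pv (lines : List String) (structured : List String) (count : Int) : List String :=
  match lines with
  | [] => structured
  | l :: rest =>
    let structured :=
      if (l != "") && !(PySem.Str.startswith l "#") && (PySem.Int.mod count 30 == 0) then
        structured ++ ["## セクション" ++ PySem.Int.toStr (PySem.Int.floordiv count 30 + 1)]
      else structured
    loopA_pv rest (structured ++ [l]) (count + 1)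

def add_section_structure_py (report : String) : String :=
  PySem.Str.join "\n" (loopA_pv ((PySem.Str.split? report "\n").getD []) [] 0)

-- ===== PORT B =====
-- decorate(j, g): prepend the chunk's header when its first line qualifies.
def decorate_pv (j : Int) (g : List String) : List String :=
  let head := PySem.List.pyGetD g 0 ""   -- g[0]; every chunk B builds is non-empty
  let header :=
    if (head != "") && !(PySem.Str.startswith head "#") then
      ["## セクション" ++ PySem.Int.toStr j]
    else []
  header ++ g

def add_section_structure_py_alt (report : String) : String :=
  let lines := (PySem.Str.split? report "\n").getD []
  let chunks := (PySem.List.pyRange 0 (lines.length : Int) 30).map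
      (fun i => PySem.List.slice lines (some i) (some (i + 30)))
  PySem.Str.join "\n" ((PySem.List.enumerate chunks 1).flatMap (fun p => decorate_pv p.1 p.2))

-- ===== PRECONDITION & SPEC =====
def Spec_add_section_structure_py (report : String) (out : String) : Prop := out = add_section_structure_py_alt report
instance (report : String) (out : String) : Decidable (Spec_add_section_structure_py report out) := by unfold Spec_add_section_structure_py; infer_instance

-- ===== CLAIM (what is proved, stated in full; the proofs are below) =====
def Claim_equal_add_section_structure_py : Prop := ∀ (report : String), Dom_add_section_structure_py report → Spec_add_section_structure_py report (add_section_structure_py report)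

-- ===== LEMMAS AND PROOFS =====

-- reference form: process the chunk at hand, recurse on the remaining lines
def chunkRec (ls : List String) (j : Int) : List String :=
  if h : ls = [] then []
  else decorate_pv j (ls.take 30) ++ chunkRec (ls.drop 30) (j + 1)
  termination_by ls.length
  decreasing_by
    have := List.length_pos_iff.mpr h
    simp
    omega

theorem loopA_pv_append (a b : List String) (acc : List String) (c : Int) :
    loopA_pv (a ++ b) acc c = loopA_pv b (loopA_pv a acc c) (c + a.length) := by
  induction a generalizing acc c with
  | nil => simp [loopA_pv]
  | cons l t ih => simp [loopA_pv, ih]; ring_nf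

theorem loopA_pv_no_header (g : List String) (acc : List String) (c : Int)
    (h : ∀ i : Nat, i < g.length → PySem.Int.mod (c + i) 30 ≠ 0) :
    loopA_pv g acc c = acc ++ g := by
  induction g generalizing acc c with
  | nil => simp [loopA_pv]
  | cons l t ih =>
    have h0 := h 0 (by simp)
    simp at h0
    rw [loopA_pv]
    simp [h0]
    rw [ih (acc ++ [l]) (c + 1) (fun i hi => by
      have := h (i + 1) (by simpa using Nat.succ_lt_succ hi)
      push_cast at this ⊢
      convert this using 2
      ring)]
    simp

theorem mod_thirty_mul (k : Int) : PySem.Int.mod (30 * k) 30 = 0 := by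
  rw [PySem.Int.mod_eq_emod_of_pos (by norm_num)]
  omega

theorem floordiv_thirty_mul (k : Int) : PySem.Int.floordiv (30 * k) 30 = k := by
  rw [PySem.Int.floordiv_eq_ediv_of_pos (by norm_num)]
  omega

-- A's loop, started at a counter 30*k, is the chunked reference form
theorem loopA_eq_chunkRec (n : Nat) (ls : List String) (acc : List String) (k : Int)
    (hn : ls.length ≤ n) : loopA_pv ls acc (30 * k) = acc ++ chunkRec ls (k + 1) := by
  induction n generalizing ls acc k with
  | zero =>
    have : ls = [] := List.eq_nil_of_length_eq_zero (Nat.le_zero.mp hn)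
    subst this
    simp [loopA_pv]; rw [chunkRec]; simp
  | succ n ih =>
    match ls with
    | [] => simp [loopA_pv]; rw [chunkRec]; simp
    | l :: t =>
      rw [chunkRec]
      simp only [List.cons_ne_nil, dite_false]
      have hget : PySem.List.pyGetD ((l :: t).take 30) 0 "" = l := by
        simp [PySem.List.pyGetD, PySem.List.pyIdx?, PySem.List.pyGet?]
      rw [loopA_pv]
      simp only [mod_thirty_mul, floordiv_thirty_mul, beq_self_eq_true, Bool.and_true]
      set acc1 := (if (l != "") && !(PySem.Str.startswith l "#") then
          acc ++ ["## セクション" ++ PySem.Int.toStr (k + 1)] else acc) with hacc1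
      have hsplit : t = t.take 29 ++ t.drop 29 := (List.take_append_drop 29 t).symm
      have hA : loopA_pv t (acc1 ++ [l]) (30 * k + 1)
          = loopA_pv (t.drop 29) (acc1 ++ [l] ++ t.take 29) (30 * k + 1 + (t.take 29).length) := by
        conv_lhs => rw [hsplit]
        rw [loopA_pv_append]
        congr 1
        apply loopA_pv_no_header
        intro i hi
        have hlen : (t.take 29).length ≤ 29 := by simp
        rw [PySem.Int.mod_eq_emod_of_pos (by norm_num)]
        omega
      rw [hA]
      by_cases hlt : t.length ≤ 29
      · have hd29 : t.drop 29 = [] := List.drop_eq_nil_of_le hlt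
        have ht30 : t.take 29 = t := List.take_of_length_le hlt
        have hdl : (l :: t).drop 30 = [] := by
          simp [List.drop_eq_nil_iff]; omega
        rw [hd29]
        simp only [loopA_pv]
        rw [hdl]
        rw [chunkRec]
        simp [decorate_pv, ht30, hacc1]
        split <;> simp [List.append_assoc]
      · rw [not_le] at hlt
        have hlen29 : (t.take 29).length = 29 := by simp; omega
        have harith : 30 * k + 1 + ((t.take 29).length : Int) = 30 * (k + 1) := by
          rw [hlen29]; push_cast; ring
        rw [harith]
        have hdlen : (t.drop 29).length ≤ n := by
          have hn' : t.length ≤ n := by simpa using hn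
          simp; omega
        rw [ih (t.drop 29) _ (k + 1) hdlen]
        have htake : (l :: t).take 30 = l :: t.take 29 := by simp
        have hdrop : (l :: t).drop 30 = t.drop 29 := by simp
        rw [htake, hdrop, hacc1]
        simp [decorate_pv]
        split <;> simp [List.append_assoc]

-- peeling the first chunk off B's range-with-step chunk list
theorem pyRange_thirty_cons (n : Int) (h : 0 < n) :
    PySem.List.pyRange 0 n 30 = 0 :: (PySem.List.pyRange 0 (n - 30) 30).map (· + 30) := by
  rw [PySem.List.pyRange_of_pos _ _ (by norm_num : (0:Int) < 30),
      PySem.List.pyRange_of_pos _ _ (by norm_num : (0:Int) < 30)]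
  have hm : (if 0 < n then ((n - 0 + 30 - 1) / 30).toNat else 0)
      = (if 0 < n - 30 then ((n - 30 - 0 + 30 - 1) / 30).toNat else 0) + 1 := by
    split <;> split <;> omega
  rw [hm, List.range_succ_eq_map]
  simp [List.map_map, Function.comp]
  intro a _
  ring

def chunksOf (ls : List String) : List (List String) :=
  (PySem.List.pyRange 0 (ls.length : Int) 30).map
    (fun i => PySem.List.slice ls (some i) (some (i + 30)))

theorem chunksOf_cons (ls : List String) (h : ls ≠ []) :
    chunksOf ls = ls.take 30 :: chunksOf (ls.drop 30) := by
  have hpos : 0 < (ls.length : Int) := by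
    have := List.length_pos_iff.mpr h
    exact_mod_cast this
  unfold chunksOf
  rw [pyRange_thirty_cons _ hpos]
  simp only [List.map_cons, List.map_map]
  congr 1
  · rw [show ((0:Int) + 30) = ((30:Nat) : Int) by norm_num,
        show ((0:Int)) = ((0:Nat) : Int) by norm_num,
        PySem.List.slice_natCast]
    simp
  · have hlen : ((ls.drop 30).length : Int) = max ((ls.length : Int) - 30) 0 := by
      simp; omega
    by_cases h30 : (ls.length : Int) - 30 ≤ 0
    · have e1 : PySem.List.pyRange 0 ((ls.length : Int) - 30) 30 = [] := by
        rw [PySem.List.pyRange_of_pos _ _ (by norm_num : (0:Int) < 30), if_neg (by omega)]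
        simp
      have e2 : PySem.List.pyRange 0 (((ls.drop 30).length : Int)) 30 = [] := by
        rw [PySem.List.pyRange_of_pos _ _ (by norm_num : (0:Int) < 30), if_neg (by omega)]
        simp
      rw [e1, e2]
      simp
    · rw [hlen, show max ((ls.length : Int) - 30) 0 = (ls.length : Int) - 30 by omega]
      apply List.map_congr_left
      intro i hi
      have hmem := (PySem.List.mem_pyRange_iff_of_pos (by norm_num : (0:Int) < 30) i).mp hi
      obtain ⟨h0i, hiub, hdvd⟩ := hmem
      simp only [Function.comp]
      rw [PySem.List.slice_toNat _ (by omega) (by omega),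
          PySem.List.slice_toNat _ (by omega) (by omega)]
      rw [List.drop_drop]
      congr 1
      · omega
      · congr 1
        omega

theorem flatMap_enumerate_chunks (m : Nat) (ls : List String) (j : Int)
    (hm : ls.length ≤ m) :
    (PySem.List.enumerate (chunksOf ls) j).flatMap (fun p => decorate_pv p.1 p.2)
      = chunkRec ls j := by
  induction m generalizing ls j with
  | zero =>
    have : ls = [] := List.eq_nil_of_length_eq_zero (Nat.le_zero.mp hm)
    subst this
    rw [chunkRec]
    simp [chunksOf, PySem.List.pyRange_of_pos _ _ (by norm_num : (0:Int) < 30)]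
  | succ m ih =>
    by_cases h : ls = []
    · subst h
      rw [chunkRec]
      simp [chunksOf, PySem.List.pyRange_of_pos _ _ (by norm_num : (0:Int) < 30)]
    · rw [chunksOf_cons ls h, PySem.List.enumerate_cons, chunkRec]
      simp only [List.flatMap_cons, dif_neg h]
      congr 1
      apply ih
      have hpos := List.length_pos_iff.mpr h
      simp
      omega

-- ===== VERDICT (by name: the statement is the Claim_ definition above) =====
theorem add_section_structure_py_spec : Claim_equal_add_section_structure_py := by
  intro report _
  unfold Spec_add_section_structure_py add_section_structure_py add_section_structure_py_alt
  congr 1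
  set ls := (PySem.Str.split? report "\n").getD [] with hls
  have h1 := loopA_eq_chunkRec ls.length ls [] 0 (le_refl _)
  have h2 := flatMap_enumerate_chunks ls.length ls 1 (le_refl _)
  simp only [MulZeroClass.mul_zero, zero_add] at h1
  rw [h1]
  simp only [List.nil_append]
  rw [← h2]
  rfl
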